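-- pv_equiv track=rewrite | github.com/ChristianJaimes/ProyectEuler | Problem6.py | sum_of_squares_and_square_of_sum
-- ===== SOURCE A (Python) =====
-- def sum_of_squares_and_square_of_sum(n):
--     sum_of_squares = 0
--     sum = 0
--     for i in range(1,n+1):
--         sum_of_squares += i ** 2
--         sum += i
--     square_sum = sum ** 2
--     return square_sum, sum_of_squares
-- ===== SOURCE B (Python) =====
-- def sum_of_squares_and_square_of_sum(n):
--     m = n if n > 0 else 0
--     s = m * (m + 1) // 2
--     return s * s, m * (m + 1) * (2 * m + 1) // 6
-- ===== Notes on version B (the rewrite author's own statement) =====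
-- stated objective: faster
-- what changed: Replaced the linear accumulation loop by Gauss's closed-form formulas for the triangular number and the square-pyramidal number.
import Mathlib
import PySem

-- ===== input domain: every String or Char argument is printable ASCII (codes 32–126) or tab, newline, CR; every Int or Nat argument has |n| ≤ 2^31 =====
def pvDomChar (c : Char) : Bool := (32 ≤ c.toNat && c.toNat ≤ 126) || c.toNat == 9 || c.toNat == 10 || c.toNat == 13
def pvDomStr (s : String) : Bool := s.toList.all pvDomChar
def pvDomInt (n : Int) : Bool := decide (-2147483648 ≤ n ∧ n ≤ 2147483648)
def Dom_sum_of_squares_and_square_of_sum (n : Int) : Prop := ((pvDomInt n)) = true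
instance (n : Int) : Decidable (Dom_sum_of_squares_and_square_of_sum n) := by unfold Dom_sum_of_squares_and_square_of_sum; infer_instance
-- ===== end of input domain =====

-- B replaces A's O(n) accumulation loop by the closed-form triangular- and square-pyramidal-number formulas (objective: faster, asymptotic).

-- ===== PORT A =====
-- loop over range(1, n+1) accumulating (sum_of_squares, sum); returns (sum**2, sum_of_squares)
def sum_of_squares_and_square_of_sum (n : Int) : List Int :=
  let p := (PySem.List.pyRange 1 (n + 1) 1).foldl
      (fun (s : Int × Int) i => (s.1 + i ^ 2, s.2 + i)) (0, 0)
  [p.2 ^ 2, p.1]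

-- ===== PORT B =====
def sum_of_squares_and_square_of_sum_alt (n : Int) : List Int :=
  let m : Int := if n > 0 then n else 0
  let s : Int := PySem.Int.floordiv (m * (m + 1)) 2
  [s * s, PySem.Int.floordiv (m * (m + 1) * (2 * m + 1)) 6]

-- ===== PRECONDITION & SPEC =====
def Spec_sum_of_squares_and_square_of_sum (n : Int) (out : List Int) : Prop := out = sum_of_squares_and_square_of_sum_alt n
instance (n : Int) (out : List Int) : Decidable (Spec_sum_of_squares_and_square_of_sum n out) := by unfold Spec_sum_of_squares_and_square_of_sum; infer_instance

-- ===== CLAIM (what is proved, stated in full; the proofs are below) =====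
def Claim_equal_sum_of_squares_and_square_of_sum : Prop := ∀ (n : Int), Dom_sum_of_squares_and_square_of_sum n → Spec_sum_of_squares_and_square_of_sum n (sum_of_squares_and_square_of_sum n)

-- ===== LEMMAS AND PROOFS =====

theorem pv_dvd2 (m : Int) : (2 : Int) ∣ m * (m + 1) := (Int.even_mul_succ_self m).two_dvd

theorem pv_dvd6 (m : Int) : (6 : Int) ∣ m * (m + 1) * (2 * m + 1) := by
  have h : ∀ x : ZMod 6, x * (x + 1) * (2 * x + 1) = 0 := by decide
  have := (ZMod.intCast_zmod_eq_zero_iff_dvd (m * (m + 1) * (2 * m + 1)) 6).mp (by push_cast; exact h (m : ZMod 6))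
  exact this

-- A's loop over 1..k computes (∑ i², ∑ i), in closed form (ediv is exact by pv_dvd6/pv_dvd2).
theorem pv_loop_eq (k : Nat) :
    (PySem.List.pyRange 1 ((k : Int) + 1) 1).foldl
      (fun (s : Int × Int) i => (s.1 + i ^ 2, s.2 + i)) (0, 0)
    = (((k : Int) * (k + 1) * (2 * k + 1)) / 6, ((k : Int) * (k + 1)) / 2) := by
  induction k with
  | zero => simp [PySem.List.pyRange_one_eq_nil]
  | succ m ih =>
      have h : PySem.List.pyRange 1 (((m : Int) + 1) + 1) 1
          = PySem.List.pyRange 1 ((m : Int) + 1) 1 ++ [(m : Int) + 1] :=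
        PySem.List.pyRange_one_succ_right (by omega)
      push_cast
      rw [h, List.foldl_append, ih]
      simp only [List.foldl]
      obtain ⟨a, ha⟩ := pv_dvd6 (m : Int)
      obtain ⟨b, hb⟩ := pv_dvd6 ((m : Int) + 1)
      obtain ⟨c, hc⟩ := pv_dvd2 (m : Int)
      obtain ⟨d, hd⟩ := pv_dvd2 ((m : Int) + 1)
      rw [ha, hc, hb, hd]
      rw [Int.mul_ediv_cancel_left _ (by norm_num : (6:Int) ≠ 0),
          Int.mul_ediv_cancel_left _ (by norm_num : (6:Int) ≠ 0),
          Int.mul_ediv_cancel_left _ (by norm_num : (2:Int) ≠ 0),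
          Int.mul_ediv_cancel_left _ (by norm_num : (2:Int) ≠ 0)]
      have e1 : 6 * b = 6 * a + 6 * (((m : Int) + 1) ^ 2) := by
        rw [← ha, ← hb]; ring
      have e2 : 2 * d = 2 * c + 2 * ((m : Int) + 1) := by
        rw [← hc, ← hd]; ring
      have hb' : b = a + ((m : Int) + 1) ^ 2 := by linarith
      have hd' : d = c + ((m : Int) + 1) := by linarith
      rw [hb', hd']

-- ===== VERDICT (by name: the statement is the Claim_ definition above) =====
theorem sum_of_squares_and_square_of_sum_spec : Claim_equal_sum_of_squares_and_square_of_sum := by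
  intro n _
  unfold Spec_sum_of_squares_and_square_of_sum sum_of_squares_and_square_of_sum sum_of_squares_and_square_of_sum_alt
  by_cases hn : n > 0
  · have hk : n = ((n.toNat : Int)) := by omega
    simp only [hn, if_pos]
    rw [hk, pv_loop_eq n.toNat]
    rw [PySem.Int.floordiv_eq_ediv_of_pos (by norm_num : (0:Int) < 2),
        PySem.Int.floordiv_eq_ediv_of_pos (by norm_num : (0:Int) < 6)]
    simp [pow_two]
  · have he : PySem.List.pyRange 1 (n + 1) 1 = [] :=
      PySem.List.pyRange_one_eq_nil (by omega)
    simp [he, hn, PySem.Int.floordiv]
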